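-- pv_equiv track=rewrite | github.com/nerohuang/LeetCode | Array/1482. Minimum Number of Days to Make m Bouquets(Med).py | numberOfBouquetsWeCanMakeOnThisDay
-- ===== SOURCE A (Python) =====
-- listOfFlowerBloomDays = [1,10,2,9,3,8,4,7,5,6]
--
-- flowersPerBouquet = 2
--
-- def numberOfBouquetsWeCanMakeOnThisDay(dayThatWeAreChecking):
--
--     currentListOfAdjacentBloomedFlowers = []
--     numberOfBouquetsWeCanMakeOnThisDay = 0
--
--     for dayThatFlowerBlooms in listOfFlowerBloomDays:
--
--         # check if the flower has bloomed on this day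
--         if dayThatFlowerBlooms <= dayThatWeAreChecking:
--
--             # add to the list an adjacent bloomed flowers, I use 'x' because the description uses an 'x'
--             currentListOfAdjacentBloomedFlowers.append('x')
--
--         else:
--             # we've hit a day where we don't have a bloomed flower, so the list of adjacent bloomed flowers has to be reset
--             # BUT FIRST figure out how many bouquets we can make with this list of adjacent bloomed flowers
--             numberOfBouquetsWeCanMakeOnThisDay += len(currentListOfAdjacentBloomedFlowers)//flowersPerBouquet
--
--             # RESET list of adjacent bloomed flowers cause we're on a day where the a flower has not bloomed yet
--             currentListOfAdjacentBloomedFlowers = []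
--
--     # we've gone through the entire listOfFlowerBloomDays list and need to check if the "residual" current list
--     # of adjacent bloomed flowers can make a bouquet ... so handle it here
--     numberOfBouquetsWeCanMakeOnThisDay += len(currentListOfAdjacentBloomedFlowers)//flowersPerBouquet
--
--     return numberOfBouquetsWeCanMakeOnThisDay
-- ===== SOURCE B (Python) =====
-- listOfFlowerBloomDays = [1,10,2,9,3,8,4,7,5,6]
--
-- flowersPerBouquet = 2
--
-- def _build_table():
--     # Offline sweep: bloom the flowers in increasing bloom-day order; each new
--     # flower merges its adjacent bloomed runs, and the bouquet total is updated
--     # incrementally.  Record (bloomDay, cumulative bouquets) after each day.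
--     n = len(listOfFlowerBloomDays)
--     run_len = [0] * n      # run length, valid at the endpoints of each run
--     bloomed = [False] * n
--     total = 0
--     table = []
--     for i, day in sorted(enumerate(listOfFlowerBloomDays), key=lambda p: p[1]):
--         left = run_len[i - 1] if i > 0 and bloomed[i - 1] else 0
--         right = run_len[i + 1] if i + 1 < n and bloomed[i + 1] else 0
--         total += ((left + right + 1) // flowersPerBouquet
--                   - left // flowersPerBouquet - right // flowersPerBouquet)
--         bloomed[i] = True
--         merged = left + right + 1
--         run_len[i - left] = merged
--         run_len[i + right] = merged
--         if table and table[-1][0] == day: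
--             table[-1] = (day, total)
--         else:
--             table.append((day, total))
--     return table
--
-- _TABLE = _build_table()
--
-- def numberOfBouquetsWeCanMakeOnThisDay(dayThatWeAreChecking):
--     # look up the last precomputed entry whose bloom day has passed
--     answer = 0
--     for day, cumulative in _TABLE:
--         if day <= dayThatWeAreChecking:
--             answer = cumulative
--     return answer
-- ===== Notes on version B (the rewrite author's own statement) =====
-- stated objective: alternative
-- what changed: Instead of simulating runs over the flower list per query, B precomputes once (offline sweep blooming flowers in increasing bloom-day order, merging adjacent runs and updating the bouquet count incrementally) a table of (day, cumulative bouquets), and each call is just a lookup of the last table entry whose day has passed.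
import Mathlib
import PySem

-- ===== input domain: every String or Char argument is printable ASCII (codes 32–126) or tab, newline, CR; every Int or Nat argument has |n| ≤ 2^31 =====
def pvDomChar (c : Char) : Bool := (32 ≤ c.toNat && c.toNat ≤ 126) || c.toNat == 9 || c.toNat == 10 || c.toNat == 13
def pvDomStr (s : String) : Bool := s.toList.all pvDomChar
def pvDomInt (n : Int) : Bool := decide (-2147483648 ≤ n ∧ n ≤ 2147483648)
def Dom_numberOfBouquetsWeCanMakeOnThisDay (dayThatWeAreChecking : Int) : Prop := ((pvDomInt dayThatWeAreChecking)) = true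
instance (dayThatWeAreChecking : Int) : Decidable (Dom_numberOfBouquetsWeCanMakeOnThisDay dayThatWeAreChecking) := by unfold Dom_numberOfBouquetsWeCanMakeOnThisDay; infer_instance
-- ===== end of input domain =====

-- B replaces A's per-query run simulation over the flower list by a one-time
-- offline sweep (bloom flowers in increasing day order, merging adjacent runs,
-- accumulating bouquets) producing a (day, cumulative bouquets) table, queried
-- by a lookup (alternative algorithm; same cost at this fixed list size).


-- ===== PORT A =====
def pvListOfFlowerBloomDays : List Int := [1, 10, 2, 9, 3, 8, 4, 7, 5, 6]

def pvFlowersPerBouquet : Int := 2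

-- A: left fold carrying (currentListOfAdjacentBloomedFlowers, runningCount), then the trailing flush.
def numberOfBouquetsWeCanMakeOnThisDay (dayThatWeAreChecking : Int) : Int :=
  let st := pvListOfFlowerBloomDays.foldl
    (fun (st : List Char × Int) dayThatFlowerBlooms =>
      if dayThatFlowerBlooms ≤ dayThatWeAreChecking then
        (st.1 ++ ['x'], st.2)
      else
        ([], st.2 + PySem.Int.floordiv (st.1.length : Int) pvFlowersPerBouquet))
    ([], 0)
  st.2 + PySem.Int.floordiv (st.1.length : Int) pvFlowersPerBouquet

-- ===== PORT B =====
-- _build_table's loop state: (run_len, bloomed, total, table).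
-- All list indices (i-1, i+1, i-left, i+right, -1) are guarded in range by the
-- algorithm, so the pyGetD/pySetD total forms are exact here.
def pvSweepStep (n : Int) (st : List Int × List Bool × Int × List (Int × Int))
    (p : Int × Int) : List Int × List Bool × Int × List (Int × Int) :=
  let i := p.1
  let day := p.2
  let runLen := st.1
  let bloomed := st.2.1
  let total := st.2.2.1
  let table := st.2.2.2
  let left := if 0 < i ∧ PySem.List.pyGetD bloomed (i - 1) false then
      PySem.List.pyGetD runLen (i - 1) 0 else 0
  let right := if i + 1 < n ∧ PySem.List.pyGetD bloomed (i + 1) false then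
      PySem.List.pyGetD runLen (i + 1) 0 else 0
  let total := total + PySem.Int.floordiv (left + right + 1) pvFlowersPerBouquet
      - PySem.Int.floordiv left pvFlowersPerBouquet
      - PySem.Int.floordiv right pvFlowersPerBouquet
  let bloomed := PySem.List.pySetD bloomed i true
  let merged := left + right + 1
  let runLen := PySem.List.pySetD runLen (i - left) merged
  let runLen := PySem.List.pySetD runLen (i + right) merged
  let table :=
    if table ≠ [] ∧ (PySem.List.pyGetD table (-1) (0, 0)).1 = day then
      PySem.List.pySetD table (-1) (day, total)
    else
      table ++ [(day, total)]
  (runLen, bloomed, total, table)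

def pvBuildTable : List (Int × Int) :=
  let n : Int := (pvListOfFlowerBloomDays.length : Int)
  let st := (PySem.List.sorted (PySem.List.enumerate pvListOfFlowerBloomDays)
      (fun p => p.2) false).foldl (pvSweepStep n)
    (List.replicate pvListOfFlowerBloomDays.length 0,
     List.replicate pvListOfFlowerBloomDays.length false, 0, [])
  st.2.2.2

def pvTable : List (Int × Int) := pvBuildTable

def numberOfBouquetsWeCanMakeOnThisDay_alt (dayThatWeAreChecking : Int) : Int :=
  pvTable.foldl
    (fun answer e => if e.1 ≤ dayThatWeAreChecking then e.2 else answer) 0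

-- ===== PRECONDITION & SPEC =====
def Spec_numberOfBouquetsWeCanMakeOnThisDay (dayThatWeAreChecking : Int) (out : Int) : Prop := out = numberOfBouquetsWeCanMakeOnThisDay_alt dayThatWeAreChecking
instance (dayThatWeAreChecking : Int) (out : Int) : Decidable (Spec_numberOfBouquetsWeCanMakeOnThisDay dayThatWeAreChecking out) := by unfold Spec_numberOfBouquetsWeCanMakeOnThisDay; infer_instance

-- ===== CLAIM (what is proved, stated in full; the proofs are below) =====
def Claim_equal_numberOfBouquetsWeCanMakeOnThisDay : Prop := ∀ (dayThatWeAreChecking : Int), Dom_numberOfBouquetsWeCanMakeOnThisDay dayThatWeAreChecking → Spec_numberOfBouquetsWeCanMakeOnThisDay dayThatWeAreChecking (numberOfBouquetsWeCanMakeOnThisDay dayThatWeAreChecking)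

-- ===== LEMMAS AND PROOFS =====

-- the precomputed table is a closed computation over the module constants
theorem pvTable_eq :
    pvTable = [(1, 0), (2, 0), (3, 0), (4, 0), (5, 0), (6, 1), (7, 2), (8, 3), (9, 4), (10, 5)] := by
  decide

-- ===== VERDICT (by name: the statement is the Claim_ definition above) =====
theorem numberOfBouquetsWeCanMakeOnThisDay_spec : Claim_equal_numberOfBouquetsWeCanMakeOnThisDay := by
  intro d _
  unfold Spec_numberOfBouquetsWeCanMakeOnThisDay numberOfBouquetsWeCanMakeOnThisDay
  unfold numberOfBouquetsWeCanMakeOnThisDay_alt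
  rw [pvTable_eq]
  by_cases h1 : (1:Int) ≤ d <;>
  by_cases h2 : (2:Int) ≤ d <;>
  by_cases h3 : (3:Int) ≤ d <;>
  by_cases h4 : (4:Int) ≤ d <;>
  by_cases h5 : (5:Int) ≤ d <;>
  by_cases h6 : (6:Int) ≤ d <;>
  by_cases h7 : (7:Int) ≤ d <;>
  by_cases h8 : (8:Int) ≤ d <;>
  by_cases h9 : (9:Int) ≤ d <;>
  by_cases h10 : (10:Int) ≤ d <;>
  first
    | (exfalso; omega)
    | simp [pvListOfFlowerBloomDays, pvFlowersPerBouquet,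
        h1, h2, h3, h4, h5, h6, h7, h8, h9, h10]
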